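-- pv_equiv track=rewrite | github.com/lucastsui/collatz-research | carry_parity_v2.py | collatz_trajectory
-- ===== SOURCE A (Python) =====
-- def collatz_step(n):
--     """One step of compressed Collatz: (3n+1)/2 if odd, n/2 if even."""
--     if n % 2 == 1:
--         return (3 * n + 1) // 2
--     else:
--         return n // 2
--
-- def collatz_trajectory(n0, p):
--     """Compute p steps of Collatz from n0, return trajectory and parity pattern."""
--     traj = [n0]
--     pattern = set()
--     n = n0
--     for j in range(p):
--         if n % 2 == 1:
--             pattern.add(j)
--         n = collatz_step(n)
--         traj.append(n)
--     return traj, pattern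
-- ===== SOURCE B (Python) =====
-- def collatz_trajectory(n0, p):
--     """Cycle-detecting algorithm: iterate while memoising each value's first
--     index in a dict; on the first repeat, extend the trajectory by periodic
--     tiling of the detected cycle instead of iterating further; the parity
--     pattern is then read parity-test-free off consecutive pairs, using
--     2*y == 3*x + 1 iff the step x -> y was an odd step."""
--     steps = p if p > 0 else 0
--     seen = {}
--     vals = []
--     n = n0
--     while len(vals) <= steps and n not in seen:
--         seen[n] = len(vals)
--         vals.append(n)
--         n = (3 * n + 1) // 2 if n % 2 == 1 else n // 2
--     if len(vals) <= steps:
--         start = seen[n]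
--         cyc = vals[start:]
--         need = steps + 1 - len(vals)
--         vals = vals + [cyc[i % len(cyc)] for i in range(need)]
--     pattern = {j for j, (x, y) in enumerate(zip(vals, vals[1:])) if 2 * y == 3 * x + 1}
--     return vals, pattern
-- ===== Notes on version B (the rewrite author's own statement) =====
-- stated objective: alternative
-- what changed: A blindly iterates the Collatz step p times, testing each value's parity to fill the set; B detects the trajectory's cycle with a first-index memo dict, extends the trajectory by periodic tiling of the detected cycle instead of iterating further, and derives the parity set parity-test-free from consecutive pairs via 2*y == 3*x + 1.
import Mathlib
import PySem

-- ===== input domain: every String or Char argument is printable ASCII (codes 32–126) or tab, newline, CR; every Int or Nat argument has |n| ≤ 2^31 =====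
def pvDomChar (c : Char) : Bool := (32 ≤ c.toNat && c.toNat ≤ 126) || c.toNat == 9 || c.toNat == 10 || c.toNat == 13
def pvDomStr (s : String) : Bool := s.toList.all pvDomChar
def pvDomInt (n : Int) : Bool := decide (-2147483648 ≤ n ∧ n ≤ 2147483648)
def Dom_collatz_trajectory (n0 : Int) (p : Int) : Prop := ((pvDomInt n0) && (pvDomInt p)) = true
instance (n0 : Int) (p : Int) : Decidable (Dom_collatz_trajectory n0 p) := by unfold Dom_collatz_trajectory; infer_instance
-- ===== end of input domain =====

-- B replaces A's parity-testing iteration by cycle detection: it memoises each value's first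
-- index in a dict, extends the trajectory by periodic tiling once a value repeats, and reads
-- the parity pattern off consecutive pairs (2*y == 3*x + 1); alternative algorithm.

-- ===== PORT A =====
def collatz_step (n : Int) : Int :=
  if PySem.Int.mod n 2 = 1 then PySem.Int.floordiv (3 * n + 1) 2
  else PySem.Int.floordiv n 2

def collatz_trajectory (n0 : Int) (p : Int) : List Int × List Int :=
  let st := (PySem.List.pyRange 0 p 1).foldl
    (fun (st : List Int × PySem.Set Int × Int) j =>
      let pat := if PySem.Int.mod st.2.2 2 = 1 then PySem.Set.add st.2.1 j else st.2.1
      let n := collatz_step st.2.2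
      (st.1 ++ [n], pat, n))
    ([n0], PySem.Set.empty, n0)
  (st.1, st.2.1)

-- ===== PORT B =====
-- Source B's while loop; fuel steps+1 bounds it exactly: every pass appends one value and the
-- loop stops at length steps+1, so the fuel is never exhausted before the condition fails
def altLoop (steps : Nat) : Nat → PySem.Dict Int Int → List Int → Int →
    PySem.Dict Int Int × List Int × Int
  | 0, seen, vals, n => (seen, vals, n)
  | fuel + 1, seen, vals, n =>
    if vals.length ≤ steps ∧ seen.get? n = none then
      altLoop steps fuel (seen.insert n (vals.length : Int)) (vals ++ [n])
        (if PySem.Int.mod n 2 = 1 then PySem.Int.floordiv (3 * n + 1) 2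
         else PySem.Int.floordiv n 2)
    else (seen, vals, n)

def collatz_trajectory_alt (n0 : Int) (p : Int) : List Int × List Int :=
  let steps : Nat := (if 0 < p then p else 0).toNat
  let st := altLoop steps (steps + 1) PySem.Dict.empty [] n0
  let seen := st.1
  let vals0 := st.2.1
  let n := st.2.2
  let vals :=
    if vals0.length ≤ steps then
      let start := (seen.get? n).getD 0   -- the key is present whenever this branch is reached
      let cyc := PySem.List.slice vals0 (some start) none
      let need : Int := (steps : Int) + 1 - (vals0.length : Int)
      vals0 ++ (PySem.List.pyRange 0 need 1).map
        (fun i => PySem.List.pyGetD cyc (PySem.Int.mod i (cyc.length : Int)) 0)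
        -- cyc[i % len(cyc)]: the index 0 ≤ i % len < len is always in range
    else vals0
  let pattern := PySem.Set.ofList
    (((PySem.List.enumerate (vals.zip (PySem.List.slice vals (some 1) none)) 0).filter
        (fun jxy => 2 * jxy.2.2 == 3 * jxy.2.1 + 1)).map (·.1))
  (vals, pattern)

-- ===== PRECONDITION & SPEC =====
def Spec_collatz_trajectory (n0 : Int) (p : Int) (out : List Int × List Int) : Prop := out = collatz_trajectory_alt n0 p
instance (n0 : Int) (p : Int) (out : List Int × List Int) : Decidable (Spec_collatz_trajectory n0 p out) := by unfold Spec_collatz_trajectory; infer_instance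

-- ===== CLAIM =====
def Claim_equal_collatz_trajectory : Prop := ∀ (n0 : Int) (p : Int), Dom_collatz_trajectory n0 p → Spec_collatz_trajectory n0 p (collatz_trajectory n0 p)

-- ===== LEMMAS AND PROOFS =====

/-- the k-th compressed-Collatz iterate -/
def iterC (n : Int) : Nat → Int
  | 0 => n
  | k + 1 => iterC (collatz_step n) k

/-- the true trajectory values after n, as A produces them -/
def altTraj (n : Int) : Nat → List Int
  | 0 => []
  | k + 1 => collatz_step n :: altTraj (collatz_step n) k

theorem pyRange_toNat (p : Int) :
    PySem.List.pyRange 0 p 1 = PySem.List.pyRange 0 ((p.toNat : Int)) 1 := by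
  rw [PySem.List.pyRange_one, PySem.List.pyRange_one]
  congr 2
  omega

theorem foldA (k : Nat) : ∀ (a : Int) (traj pat : List Int) (n : Int),
    (∀ x ∈ pat, x < a) →
    ((PySem.List.pyRange a (a + k) 1).foldl
      (fun (st : List Int × PySem.Set Int × Int) j =>
        let pat := if PySem.Int.mod st.2.2 2 = 1 then PySem.Set.add st.2.1 j else st.2.1
        let n := collatz_step st.2.2
        (st.1 ++ [n], pat, n))
      (traj, pat, n)) =
    (traj ++ altTraj n k,
     pat ++ (PySem.List.pyRange a (a + k) 1).filter
       (fun j => PySem.Int.mod (iterC n (j - a).toNat) 2 = 1),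
     iterC n k) := by
  induction k with
  | zero =>
    intro a traj pat n _
    simp [altTraj, iterC]
  | succ k ih =>
    intro a traj pat n hpat
    have hlt : a < a + (k + 1 : Nat) := by push_cast; omega
    rw [PySem.List.pyRange_one_cons hlt]
    have hstep : (a + 1) + (k : Int) = a + ((k + 1 : Nat) : Int) := by push_cast; omega
    simp only [List.foldl_cons]
    have hpat' : ∀ x ∈ (if PySem.Int.mod n 2 = 1 then PySem.Set.add pat a else pat), x < a + 1 := by
      intro x hx
      split at hx
      · rcases (PySem.Set.mem_add _ _ _).1 hx with h | h
        · exact lt_trans (hpat x h) (by omega)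
        · omega
      · exact lt_trans (hpat x hx) (by omega)
    have := ih (a + 1) (traj ++ [collatz_step n])
      (if PySem.Int.mod n 2 = 1 then PySem.Set.add pat a else pat) (collatz_step n) hpat'
    rw [hstep] at this
    rw [this]
    refine Prod.ext ?_ (Prod.ext ?_ ?_)
    · simp [altTraj]
    · have hadd : (if PySem.Int.mod n 2 = 1 then PySem.Set.add pat a else pat)
          = pat ++ (if PySem.Int.mod n 2 = 1 then [a] else []) := by
        split
        · rw [PySem.Set.add_of_not_mem (fun h => lt_irrefl a (hpat a h))]
        · simp
      have hshift : (PySem.List.pyRange (a + 1) (a + ((k + 1 : Nat) : Int)) 1).filter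
            (fun j => PySem.Int.mod (iterC (collatz_step n) (j - (a + 1)).toNat) 2 = 1)
          = (PySem.List.pyRange (a + 1) (a + ((k + 1 : Nat) : Int)) 1).filter
            (fun j => PySem.Int.mod (iterC n (j - a).toNat) 2 = 1) := by
        apply List.filter_congr
        intro j hj
        have hj' := (PySem.List.mem_pyRange_one).1 hj
        have htn : (j - a).toNat = (j - (a + 1)).toNat + 1 := by omega
        rw [htn]
        simp [iterC]
      rw [hshift, hadd]
      have : (iterC n (a - a).toNat) = n := by simp [iterC]
      simp only [List.filter_cons, this]
      split_ifs <;> simp_all <;> omega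
    · simp [iterC]

/-- appending a step on the right -/
theorem iterC_add (a : Nat) : ∀ (b : Nat) (n : Int), iterC n (a + b) = iterC (iterC n a) b := by
  induction a with
  | zero => intro b n; simp [iterC]
  | succ a ih =>
    intro b n
    rw [Nat.succ_add]
    show iterC (collatz_step n) (a + b) = iterC (iterC (collatz_step n) a) b
    exact ih b (collatz_step n)

/-- A's trajectory is the list of iterates -/
theorem traj_eq (k : Nat) : ∀ (n : Int), n :: altTraj n k = (List.range (k + 1)).map (iterC n) := by
  induction k with
  | zero => intro n; simp [altTraj, iterC, List.range_succ]
  | succ k ih =>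
    intro n
    rw [List.range_succ_eq_map, List.map_cons]
    have hcomp : List.map (iterC n) (List.map Nat.succ (List.range (k + 1)))
        = List.map (iterC (collatz_step n)) (List.range (k + 1)) := by
      rw [List.map_map]; rfl
    rw [hcomp, ← ih (collatz_step n)]
    rfl

/-- 2*y = 3*x+1 on a consecutive pair says exactly that the step from x was odd -/
theorem pairOdd (x : Int) : (2 * collatz_step x = 3 * x + 1) ↔ PySem.Int.mod x 2 = 1 := by
  have e2 : PySem.Int.mod x 2 = x % 2 := PySem.Int.mod_eq_emod_of_pos (by norm_num)
  have ed : ∀ y : Int, PySem.Int.floordiv y 2 = y / 2 := fun _ =>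
    PySem.Int.floordiv_eq_ediv_of_pos (by norm_num)
  unfold collatz_step
  rcases PySem.Int.mod_two_eq x with h | h <;> rw [h] <;>
    simp only [e2] at h <;> norm_num [ed] <;> omega

/-- periodicity of the iterates once a value repeats -/
theorem per_mod (n0 : Int) (s c : Nat) (hc : 0 < c) (h : iterC n0 (s + c) = iterC n0 s) :
    ∀ u, iterC n0 (s + u) = iterC n0 (s + u % c) := by
  intro u
  induction u using Nat.strong_induction_on with
  | _ u ih =>
    by_cases hu : u < c
    · rw [Nat.mod_eq_of_lt hu]
    · have hstep : iterC n0 (s + u) = iterC n0 (s + (u - c)) := by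
        have : s + u = (s + c) + (u - c) := by omega
        rw [this, iterC_add, h, ← iterC_add]
      have hm : u % c = (u - c) % c := Nat.mod_eq_sub_mod (by omega)
      rw [hstep, ih (u - c) (by omega), hm]

/-- the loop invariant: altLoop produces the iterate prefix and a sound memo dict -/
theorem loopInv (steps : Nat) (n0 : Int) : ∀ (fuel : Nat) (L : Nat) (seen : PySem.Dict Int Int),
    steps + 1 ≤ fuel + L → L ≤ steps + 1 →
    (∀ m i, seen.get? m = some i → ∃ j : Nat, i = (j : Int) ∧ j < L ∧ iterC n0 j = m) →
    ∃ L' : Nat, L ≤ L' ∧ L' ≤ steps + 1 ∧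
      (altLoop steps fuel seen ((List.range L).map (iterC n0)) (iterC n0 L)).2.1
          = (List.range L').map (iterC n0) ∧
      (altLoop steps fuel seen ((List.range L).map (iterC n0)) (iterC n0 L)).2.2 = iterC n0 L' ∧
      (L' = steps + 1 ∨
        (L' ≤ steps ∧ ∃ s : Nat,
          ((altLoop steps fuel seen ((List.range L).map (iterC n0)) (iterC n0 L)).1).get?
              (iterC n0 L') = some (s : Int) ∧ s < L' ∧ iterC n0 s = iterC n0 L')) := by
  intro fuel
  induction fuel with
  | zero =>
    intro L seen hfuel hL _
    have hLe : L = steps + 1 := by omega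
    exact ⟨L, le_refl L, by omega, rfl, rfl, Or.inl hLe⟩
  | succ fuel ih =>
    intro L seen hfuel hL hsound
    simp only [altLoop, List.length_map, List.length_range]
    by_cases hc : L ≤ steps ∧ seen.get? (iterC n0 L) = none
    · rw [if_pos hc]
      have hvals : (List.range L).map (iterC n0) ++ [iterC n0 L]
          = (List.range (L + 1)).map (iterC n0) := by
        rw [List.range_succ, List.map_append, List.map_cons, List.map_nil]
      have hn : (if PySem.Int.mod (iterC n0 L) 2 = 1
            then PySem.Int.floordiv (3 * iterC n0 L + 1) 2
            else PySem.Int.floordiv (iterC n0 L) 2) = iterC n0 (L + 1) := by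
        rw [iterC_add L 1]
        rfl
      have hsound' : ∀ m i, (seen.insert (iterC n0 L) (L : Int)).get? m = some i →
          ∃ j : Nat, i = (j : Int) ∧ j < L + 1 ∧ iterC n0 j = m := by
        intro m i hm
        by_cases hme : m = iterC n0 L
        · subst hme
          rw [PySem.Dict.get?_insert_self] at hm
          refine ⟨L, ?_, by omega, rfl⟩
          injection hm with h
          exact h.symm
        · rw [PySem.Dict.get?_insert_of_ne _ _ hme] at hm
          obtain ⟨j, hji, hjL, hjm⟩ := hsound m i hm
          exact ⟨j, hji, by omega, hjm⟩
      rw [hvals, hn]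
      obtain ⟨L', h1, h2, h3, h4, h5⟩ := ih (L + 1) (seen.insert (iterC n0 L) (L : Int))
        (by omega) (by omega) hsound'
      exact ⟨L', by omega, h2, h3, h4, h5⟩
    · rw [if_neg hc]
      by_cases hLs : L ≤ steps
      · have hget : ¬ seen.get? (iterC n0 L) = none := fun h => hc ⟨hLs, h⟩
        obtain ⟨i, hi⟩ := Option.ne_none_iff_exists'.1 hget
        obtain ⟨s, hsi, hsL, hsm⟩ := hsound _ i hi
        exact ⟨L, le_refl L, by omega, rfl, rfl,
          Or.inr ⟨hLs, s, by rw [hi, hsi], hsL, hsm⟩⟩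
      · exact ⟨L, le_refl L, by omega, rfl, rfl, Or.inl (by omega)⟩

/-- periodic tiling reproduces the full iterate list -/
theorem tile (n0 : Int) (steps L s : Nat) (hsL : s < L) (hLs : L ≤ steps)
    (hper : iterC n0 L = iterC n0 s) :
    (List.range L).map (iterC n0) ++
      (PySem.List.pyRange 0 ((steps : Int) + 1 - (((List.range L).map (iterC n0)).length : Int)) 1).map
        (fun i => PySem.List.pyGetD
          (PySem.List.slice ((List.range L).map (iterC n0)) (some (s : Int)) none)
          (PySem.Int.mod i (((PySem.List.slice ((List.range L).map (iterC n0)) (some (s : Int)) none).length : Int))) 0)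
      = (List.range (steps + 1)).map (iterC n0) := by
  set f := iterC n0 with hf
  have hslice : PySem.List.slice ((List.range L).map f) (some (s : Int)) none
      = ((List.range L).map f).drop s := PySem.List.slice_from_natCast _ s
  have hlen : (((List.range L).map f).drop s).length = L - s := by simp
  set c := L - s with hcdef
  have hc : 0 < c := by omega
  have hcyc : ∀ t, t < c → (((List.range L).map f).drop s).getD t 0 = f (s + t) := by
    intro t ht
    have hst : s + t < L := by omega
    rw [List.getD_eq_getElem _ _ (by omega)]
    simp
  have hperiod : ∀ u, f (s + u) = f (s + u % c) := by
    apply per_mod n0 s c hc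
    rw [show s + c = L by omega]
    exact hper
  have hN : ((steps : Int) + 1 - (((List.range L).map f).length : Int))
      = ((steps + 1 - L : Nat) : Int) := by simp; omega
  set N := steps + 1 - L with hNdef
  rw [hN, PySem.List.pyRange_zero_nat, List.map_map]
  have hmap : ((List.range N).map
      ((fun i => PySem.List.pyGetD (PySem.List.slice ((List.range L).map f) (some (s : Int)) none)
        (PySem.Int.mod i (((PySem.List.slice ((List.range L).map f) (some (s : Int)) none).length : Int))) 0)
        ∘ (fun k : Nat => (k : Int))))
      = (List.range N).map (fun k => f (L + k)) := by
    apply List.map_congr_left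
    intro k _
    simp only [Function.comp, hslice, hlen]
    rw [PySem.Int.mod_natCast, PySem.List.pyGetD_natCast]
    rw [hcyc (k % c) (Nat.mod_lt _ hc)]
    have : L + k = s + (c + k) := by omega
    rw [this, hperiod (c + k), Nat.add_mod_left]
  rw [hmap]
  have : steps + 1 = L + N := by omega
  rw [this, List.range_add, List.map_append, List.map_map]
  rfl

/-- the pair-based filter over the trajectory equals A's indexed parity filter -/
theorem enumZip (k : Nat) : ∀ (n : Int) (s : Int),
    ((PySem.List.enumerate ((n :: altTraj n k).zip (altTraj n k)) s).filter
        (fun jxy => 2 * jxy.2.2 == 3 * jxy.2.1 + 1)).map (·.1)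
      = (PySem.List.pyRange s (s + k) 1).filter
          (fun j => PySem.Int.mod (iterC n (j - s).toNat) 2 = 1) := by
  induction k with
  | zero =>
    intro n s
    rw [show s + ((0 : Nat) : Int) = s by simp, PySem.List.pyRange_one_eq_nil (le_refl s)]
    simp [altTraj]
  | succ k ih =>
    intro n s
    have hlt : s < s + ((k + 1 : Nat) : Int) := by push_cast; omega
    rw [PySem.List.pyRange_one_cons hlt]
    have hshift : (PySem.List.pyRange (s + 1) (s + ((k + 1 : Nat) : Int)) 1).filter
          (fun j => PySem.Int.mod (iterC n (j - s).toNat) 2 = 1)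
        = (PySem.List.pyRange (s + 1) (s + ((k + 1 : Nat) : Int)) 1).filter
          (fun j => PySem.Int.mod (iterC (collatz_step n) (j - (s + 1)).toNat) 2 = 1) := by
      apply List.filter_congr
      intro j hj
      have hj' := (PySem.List.mem_pyRange_one).1 hj
      have htn : (j - s).toNat = (j - (s + 1)).toNat + 1 := by omega
      rw [htn]
      simp [iterC]
    have harg : (s + 1) + (k : Int) = s + ((k + 1 : Nat) : Int) := by push_cast; omega
    have hih := ih (collatz_step n) (s + 1)
    rw [harg] at hih
    show (((s, (n, collatz_step n)) ::
        PySem.List.enumerate ((collatz_step n :: altTraj (collatz_step n) k).zip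
          (altTraj (collatz_step n) k)) (s + 1)).filter
        (fun jxy => 2 * jxy.2.2 == 3 * jxy.2.1 + 1)).map (·.1) = _
    rw [List.filter_cons]
    have hhead : iterC n (s - s).toNat = n := by simp [iterC]
    simp only [hhead, List.filter_cons, hshift]
    have e2 : ∀ x : Int, PySem.Int.mod x 2 = x % 2 := fun _ =>
      PySem.Int.mod_eq_emod_of_pos (by norm_num)
    simp only [e2] at hih ⊢
    push_cast at hih ⊢
    by_cases h : n % 2 = 1
    · have hp : 2 * collatz_step n = 3 * n + 1 := by
        apply (pairOdd n).mpr
        rw [e2 n]; exact h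
      simp [h, hp, hih]
    · have h0 : n % 2 = 0 := by omega
      have hp : ¬ 2 * collatz_step n = 3 * n + 1 := by
        intro hh
        have := (pairOdd n).mp hh
        rw [e2 n] at this
        omega
      simp [h0, hp, hih]

-- ===== VERDICT =====
theorem collatz_trajectory_spec : Claim_equal_collatz_trajectory := by
  intro n0 p _
  unfold Spec_collatz_trajectory
  set k := p.toNat with hk
  have hfold := foldA k 0 [n0] PySem.Set.empty n0 (by intro x hx; simp [PySem.Set.empty] at hx)
  rw [show (0 : Int) + (k : Int) = ((k : Int)) by omega, ← pyRange_toNat p] at hfold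
  have hsteps : (if 0 < p then p else 0).toNat = k := by rw [hk]; split <;> omega
  simp only [collatz_trajectory, collatz_trajectory_alt, hfold, hsteps]
  have hsound0 : ∀ m i, (PySem.Dict.empty : PySem.Dict Int Int).get? m = some i →
      ∃ j : Nat, i = (j : Int) ∧ j < 0 ∧ iterC n0 j = m := by
    intro m i hm
    simp [PySem.Dict.empty, PySem.Dict.get?] at hm
  obtain ⟨L', hLL, hLle, hvals, hn, hexit⟩ := loopInv k n0 (k + 1) 0 PySem.Dict.empty
    (by omega) (by omega) hsound0
  simp only [List.range_zero, List.map_nil] at hvals hn hexit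
  have hit0 : iterC n0 0 = n0 := rfl
  rw [hit0] at hvals hn hexit
  rw [hvals, hn]
  have hvalsEq : (if ((List.range L').map (iterC n0)).length ≤ k then
      ((List.range L').map (iterC n0)) ++
        (PySem.List.pyRange 0 ((k : Int) + 1 - ((((List.range L').map (iterC n0)).length : Nat) : Int)) 1).map
          (fun i => PySem.List.pyGetD
            (PySem.List.slice ((List.range L').map (iterC n0))
              (some (((altLoop k (k + 1) PySem.Dict.empty [] n0).1.get? (iterC n0 L')).getD 0)) none)
            (PySem.Int.mod i (((PySem.List.slice ((List.range L').map (iterC n0))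
              (some (((altLoop k (k + 1) PySem.Dict.empty [] n0).1.get? (iterC n0 L')).getD 0)) none).length : Int))) 0)
      else ((List.range L').map (iterC n0)))
      = (List.range (k + 1)).map (iterC n0) := by
    simp only [List.length_map, List.length_range]
    by_cases hcase : L' ≤ k
    · rw [if_pos hcase]
      rcases hexit with h | ⟨_, s, hget, hsL, hsm⟩
      · omega
      · rw [hget]
        have : (some (s : Int)).getD 0 = (s : Int) := rfl
        rw [this]
        have ht := tile n0 k L' s hsL hcase hsm.symm
        simp only [List.length_map, List.length_range] at ht
        exact ht
    · rw [if_neg hcase]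
      have : L' = k + 1 := by omega
      rw [this]
  rw [hvalsEq, ← traj_eq k n0]
  have hzip : PySem.List.slice (n0 :: altTraj n0 k) (some 1) none = altTraj n0 k := by
    rw [PySem.List.slice_from_one]
    rfl
  rw [hzip]
  have henum := enumZip k n0 0
  rw [show (0 : Int) + (k : Int) = ((k : Int)) by omega, ← pyRange_toNat p] at henum
  simp only [henum]
  simp only [show ∀ j : Int, j - 0 = j from fun j => by ring]
  have hnd := List.Nodup.filter
    (fun j => decide (PySem.Int.mod (iterC n0 j.toNat) 2 = 1)) (PySem.List.nodup_pyRange_one 0 p)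
  rw [PySem.Set.ofList_eq_self_of_nodup _ hnd]
  simp [PySem.Set.empty]
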